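-- pv_equiv track=rewrite | github.com/Pro-CSolution/Legacy-GlobalTech-Backend | app/modbus_engine/manager.py | optimize_blocks
-- ===== SOURCE A (Python) =====
-- from typing import Any, Dict, List, Set, Tuple
--
-- def optimize_blocks(addresses: List[int]) -> List[Tuple[int, int]]:
--     """
--     Agrupa direcciones individuales en bloques de lectura Modbus para eficiencia.
--     Ejemplo: [10, 11, 12, 20] -> [(10, 3), (20, 1)]
--     """
--     if not addresses:
--         return []
--
--     sorted_addr = sorted(list(set(addresses)))
--     blocks = []
--
--     current_start = sorted_addr[0]
--     current_count = 1
--     last_addr = sorted_addr[0]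
--
--     # Gap máximo permitido para agrupar en una sola petición
--     MAX_GAP = 20
--     # Tamaño máximo de bloque Modbus (usualmente 125 registros)
--     MAX_BLOCK_SIZE = 100
--
--     for addr in sorted_addr[1:]:
--         gap = addr - last_addr
--         new_count_if_merged = addr - current_start + 1
--
--         if gap <= MAX_GAP and new_count_if_merged <= MAX_BLOCK_SIZE:
--             current_count = new_count_if_merged
--         else:
--             blocks.append((current_start, current_count))
--             current_start = addr
--             current_count = 1
--         last_addr = addr
--
--     blocks.append((current_start, current_count))
--     return blocks
-- ===== SOURCE B (Python) =====
-- from typing import List, Tuple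
--
-- def optimize_blocks(addresses: List[int]) -> List[Tuple[int, int]]:
--     """Two-pass variant: split the sorted unique addresses into gap-bounded
--     segments first, then greedily cut each segment into size-bounded blocks."""
--     if not addresses:
--         return []
--     MAX_GAP = 20
--     MAX_BLOCK_SIZE = 100
--     sorted_addr = sorted(set(addresses))
--
--     # pass 1: contiguous segments (consecutive gap <= MAX_GAP)
--     segments = []
--     seg = [sorted_addr[0]]
--     prev = sorted_addr[0]
--     for a in sorted_addr[1:]:
--         if a - prev > MAX_GAP:
--             segments.append(seg)
--             seg = [a]
--         else:
--             seg.append(a)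
--         prev = a
--     segments.append(seg)
--
--     # pass 2: greedy size-bounded blocks inside each segment
--     blocks = []
--     for s in segments:
--         bs = s[0]
--         p = s[0]
--         for a in s[1:]:
--             if a - bs + 1 > MAX_BLOCK_SIZE:
--                 blocks.append((bs, p - bs + 1))
--                 bs = a
--             p = a
--         blocks.append((bs, p - bs + 1))
--     return blocks
-- ===== Notes on version B (the rewrite author's own statement) =====
-- stated objective: alternative
-- what changed: A's single fused fold (4-tuple state checking gap and size together) is replaced by two explicit passes: first split the sorted unique addresses into gap-bounded segments, then greedily cut each segment into size-bounded blocks and concatenate.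
import Mathlib
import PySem

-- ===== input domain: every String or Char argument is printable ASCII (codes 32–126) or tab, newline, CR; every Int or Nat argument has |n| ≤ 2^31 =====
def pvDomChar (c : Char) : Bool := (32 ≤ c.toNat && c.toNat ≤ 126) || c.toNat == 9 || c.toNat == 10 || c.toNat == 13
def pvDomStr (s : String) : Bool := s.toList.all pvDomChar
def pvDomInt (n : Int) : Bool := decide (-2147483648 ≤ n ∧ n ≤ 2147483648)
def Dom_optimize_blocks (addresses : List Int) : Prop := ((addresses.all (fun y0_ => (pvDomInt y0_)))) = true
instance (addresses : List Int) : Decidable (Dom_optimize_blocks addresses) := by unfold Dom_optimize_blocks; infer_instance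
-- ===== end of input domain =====

-- B replaces A's fused single pass by two explicit passes (gap segmentation, then
-- size splitting per segment); same cost, alternative decomposition.

-- ===== PORT A =====
-- state: (blocks, current_start, current_count, last_addr)
def optimize_blocks (addresses : List Int) : List (Int × Int) :=
  if addresses = [] then []
  else
    match PySem.List.sorted (PySem.Set.ofList addresses) (fun x => x) false with
    | [] => []   -- unreachable (sorted set of a nonempty list is nonempty); totality guard only
    | x :: rest =>
      let st := rest.foldl (fun (st : List (Int × Int) × Int × Int × Int) addr =>
          let blocks := st.1; let cs := st.2.1; let cc := st.2.2.1; let la := st.2.2.2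
          if addr - la ≤ 20 ∧ addr - cs + 1 ≤ 100 then
            (blocks, cs, addr - cs + 1, addr)
          else
            (blocks ++ [(cs, cc)], addr, 1, addr)) ([], x, 1, x)
      st.1 ++ [(st.2.1, st.2.2.1)]

-- ===== PORT B =====
def optimize_blocks_alt (addresses : List Int) : List (Int × Int) :=
  if addresses = [] then []
  else
    match PySem.List.sorted (PySem.Set.ofList addresses) (fun x => x) false with
    | [] => []   -- unreachable; totality guard only
    | x :: rest =>
      -- pass 1: segments, state (segments, seg, prev)
      let s1 := rest.foldl (fun (st : List (List Int) × List Int × Int) a =>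
          let segments := st.1; let seg := st.2.1; let prev := st.2.2
          if a - prev > 20 then (segments ++ [seg], [a], a)
          else (segments, seg ++ [a], a)) ([], [x], x)
      let segments := s1.1 ++ [s1.2.1]
      -- pass 2: greedy size-bounded blocks inside each segment
      segments.foldl (fun (blocks : List (Int × Int)) s =>
        match s with
        | [] => blocks   -- unreachable; totality guard only
        | s0 :: stail =>
          let st := stail.foldl (fun (st : List (Int × Int) × Int × Int) a =>
              let bl := st.1; let bs := st.2.1; let p := st.2.2
              if a - bs + 1 > 100 then (bl ++ [(bs, p - bs + 1)], a, a)
              else (bl, bs, a)) (blocks, s0, s0)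
          st.1 ++ [(st.2.1, st.2.2 - st.2.1 + 1)]) []

-- ===== PRECONDITION & SPEC =====
def Spec_optimize_blocks (addresses : List Int) (out : List (Int × Int)) : Prop := out = optimize_blocks_alt addresses
instance (addresses : List Int) (out : List (Int × Int)) : Decidable (Spec_optimize_blocks addresses out) := by unfold Spec_optimize_blocks; infer_instance

-- ===== CLAIM (what is proved, stated in full; the proofs are below) =====
def Claim_equal_optimize_blocks : Prop := ∀ (addresses : List Int), Dom_optimize_blocks addresses → Spec_optimize_blocks addresses (optimize_blocks addresses)

-- ===== LEMMAS AND PROOFS =====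

-- common recursive reference: the merged block stream, state (cs, la)
def pvFB (cs la : Int) : List Int → List (Int × Int)
  | [] => [(cs, la - cs + 1)]
  | a :: rest =>
    if a - la ≤ 20 ∧ a - cs + 1 ≤ 100 then pvFB cs a rest
    else (cs, la - cs + 1) :: pvFB a a rest

-- A's fold, with count invariant cc = la - cs + 1, computes pvFB
theorem pvA_fold (l : List Int) : ∀ (b : List (Int × Int)) (cs la : Int),
    (let st := l.foldl (fun (st : List (Int × Int) × Int × Int × Int) addr =>
        let blocks := st.1; let cs := st.2.1; let cc := st.2.2.1; let la := st.2.2.2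
        if addr - la ≤ 20 ∧ addr - cs + 1 ≤ 100 then (blocks, cs, addr - cs + 1, addr)
        else (blocks ++ [(cs, cc)], addr, 1, addr)) (b, cs, la - cs + 1, la)
     st.1 ++ [(st.2.1, st.2.2.1)]) = b ++ pvFB cs la l := by
  induction l with
  | nil => intro b cs la; simp [pvFB]
  | cons a rest ih =>
    intro b cs la
    simp only [List.foldl_cons, pvFB]
    by_cases h : a - la ≤ 20 ∧ a - cs + 1 ≤ 100
    · simpa [h] using ih b cs a
    · have := ih (b ++ [(cs, la - cs + 1)]) a a
      simp only [if_neg h]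
      simpa using this

-- B helpers: runI = pass-2 inner loop (emitted blocks, bs, prev)
def pvRunI (bs p : Int) : List Int → List (Int × Int) × Int × Int
  | [] => ([], bs, p)
  | a :: rest =>
    if a - bs + 1 > 100 then
      let r := pvRunI a a rest
      ((bs, p - bs + 1) :: r.1, r.2)
    else pvRunI bs a rest

theorem pvRunI_append (u : List Int) : ∀ (v : List Int) (bs p : Int),
    pvRunI bs p (u ++ v) =
      (let r := pvRunI bs p u
       let r' := pvRunI r.2.1 r.2.2 v
       (r.1 ++ r'.1, r'.2)) := by
  induction u with
  | nil => intro v bs p; simp [pvRunI]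
  | cons a rest ih =>
    intro v bs p
    simp only [List.cons_append, pvRunI]
    by_cases h : a - bs + 1 > 100
    · simp [h, ih v a a]
    · simp only [if_neg h, ih v bs a]

def pvProcOne : List Int → List (Int × Int)
  | [] => []
  | s0 :: stail =>
    let r := pvRunI s0 s0 stail
    r.1 ++ [(r.2.1, r.2.2 - r.2.1 + 1)]

-- B's pass-1 as recursion: segsR seg prev l = final list of segments
def pvSegsR (seg : List Int) (prev : Int) : List Int → List (List Int)
  | [] => [seg]
  | a :: rest =>
    if a - prev > 20 then seg :: pvSegsR [a] a rest
    else pvSegsR (seg ++ [a]) a rest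

-- pass-1 fold computes pvSegsR
theorem pvSeg_fold (l : List Int) : ∀ (segments : List (List Int)) (seg : List Int) (prev : Int),
    (let s1 := l.foldl (fun (st : List (List Int) × List Int × Int) a =>
        let segments := st.1; let seg := st.2.1; let prev := st.2.2
        if a - prev > 20 then (segments ++ [seg], [a], a)
        else (segments, seg ++ [a], a)) (segments, seg, prev)
     s1.1 ++ [s1.2.1]) = segments ++ pvSegsR seg prev l := by
  induction l with
  | nil => intro segments seg prev; simp [pvSegsR]
  | cons a rest ih =>
    intro segments seg prev
    simp only [List.foldl_cons, pvSegsR]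
    by_cases h : a - prev > 20
    · have := ih (segments ++ [seg]) [a] a
      simp only [if_pos h]
      simpa using this
    · simpa [h] using ih segments (seg ++ [a]) a

-- pass-2 inner fold computes pvRunI
theorem pvInner_fold (stail : List Int) : ∀ (blocks : List (Int × Int)) (bs p : Int),
    stail.foldl (fun (st : List (Int × Int) × Int × Int) a =>
        let bl := st.1; let bs := st.2.1; let p := st.2.2
        if a - bs + 1 > 100 then (bl ++ [(bs, p - bs + 1)], a, a)
        else (bl, bs, a)) (blocks, bs, p) =
      (blocks ++ (pvRunI bs p stail).1, (pvRunI bs p stail).2) := by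
  induction stail with
  | nil => intro blocks bs p; simp [pvRunI]
  | cons a rest ih =>
    intro blocks bs p
    simp only [List.foldl_cons, pvRunI]
    by_cases h : a - bs + 1 > 100
    · have := ih (blocks ++ [(bs, p - bs + 1)]) a a
      simp only [if_pos h]
      simpa using this
    · simpa [h] using ih blocks bs a

-- pass-2 outer fold = flat map of pvProcOne
theorem pvOuter_fold (S : List (List Int)) : ∀ (blocks : List (Int × Int)),
    S.foldl (fun (blocks : List (Int × Int)) s =>
      match s with
      | [] => blocks
      | s0 :: stail =>
        let st := stail.foldl (fun (st : List (Int × Int) × Int × Int) a =>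
            let bl := st.1; let bs := st.2.1; let p := st.2.2
            if a - bs + 1 > 100 then (bl ++ [(bs, p - bs + 1)], a, a)
            else (bl, bs, a)) (blocks, s0, s0)
        st.1 ++ [(st.2.1, st.2.2 - st.2.1 + 1)]) blocks
    = blocks ++ S.flatMap pvProcOne := by
  induction S with
  | nil => intro blocks; simp
  | cons s rest ih =>
    intro blocks
    cases s with
    | nil => simpa [pvProcOne] using ih blocks
    | cons s0 stail =>
      simp only [List.foldl_cons, pvInner_fold stail blocks s0 s0]
      rw [ih]
      simp [pvProcOne, List.append_assoc]

-- key lemma: segments + per-segment splitting = the merged stream pvFB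
theorem pvKey (l : List Int) : ∀ (s0 : Int) (stail : List Int) (E : List (Int × Int)) (bs prev : Int),
    pvRunI s0 s0 stail = (E, bs, prev) →
    (pvSegsR (s0 :: stail) prev l).flatMap pvProcOne = E ++ pvFB bs prev l := by
  induction l with
  | nil =>
    intro s0 stail E bs prev h
    simp [pvSegsR, pvProcOne, pvFB, h]
  | cons a rest ih =>
    intro s0 stail E bs prev h
    simp only [pvSegsR, pvFB]
    by_cases hg : a - prev > 20
    · have h2 := ih a [] [] a a rfl
      have hc : ¬ (a - prev ≤ 20 ∧ a - bs + 1 ≤ 100) := by omega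
      simp only [if_pos hg, if_neg hc, List.flatMap_cons, h2, pvProcOne, h]
      simp
    · have hrun : pvRunI s0 s0 (stail ++ [a]) =
          (if a - bs + 1 > 100 then (E ++ [(bs, prev - bs + 1)], a, a) else (E, bs, a)) := by
        rw [pvRunI_append stail [a] s0 s0, h]
        by_cases hs : a - bs + 1 > 100
        · simp [pvRunI, hs]
        · simp [pvRunI, hs]
      simp only [if_neg hg]
      by_cases hs : a - bs + 1 > 100
      · have h2 := ih s0 (stail ++ [a]) (E ++ [(bs, prev - bs + 1)]) a a (by rw [hrun]; simp [hs])
        have hc : ¬ (a - prev ≤ 20 ∧ a - bs + 1 ≤ 100) := by omega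
        rw [show (s0 :: stail) ++ [a] = s0 :: (stail ++ [a]) by simp] at *
        rw [h2, if_neg hc]
        simp
      · have h2 := ih s0 (stail ++ [a]) E bs a (by rw [hrun]; simp [hs])
        have hc : a - prev ≤ 20 ∧ a - bs + 1 ≤ 100 := by omega
        rw [show (s0 :: stail) ++ [a] = s0 :: (stail ++ [a]) by simp] at *
        rw [h2, if_pos hc]

-- ===== VERDICT (by name: the statement is the Claim_ definition above) =====
theorem optimize_blocks_spec : Claim_equal_optimize_blocks := by
  intro addresses _
  unfold Spec_optimize_blocks optimize_blocks optimize_blocks_alt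
  by_cases he : addresses = []
  · simp [he]
  · simp only [if_neg he]
    cases hsa : PySem.List.sorted (PySem.Set.ofList addresses) (fun x => x) false with
    | nil => rfl
    | cons x rest =>
      dsimp only
      have hA := pvA_fold rest [] x x
      simp only at hA
      rw [show x - x + 1 = 1 by ring] at hA
      rw [hA]
      have hS := pvSeg_fold rest [] [x] x
      simp only at hS
      rw [hS]
      have hO := pvOuter_fold (pvSegsR [x] x rest) []
      have hK := pvKey rest x [] [] x x rfl
      simp only [List.nil_append] at hO hK ⊢
      rw [hO, hK]
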